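-- pv_equiv track=rewrite | github.com/dirediredock/Census-Stub | EVAL_EclecticNetworkBenchmark/FIG_CumulativeBMatrix.py | Census_of_Cumulative
-- ===== SOURCE A (Python) =====
-- def Census_of_Cumulative(list_of_lists):
--     Cumulative_Census = []
--     for signal in list_of_lists:
--         aggregation = 0
--         cumulative_signal = []
--         for value in signal:
--             aggregation += value
--             cumulative_signal.append(aggregation)
--         Cumulative_Census.append(cumulative_signal[:-1])
--     return Cumulative_Census
-- ===== SOURCE B (Python) =====
-- def Census_of_Cumulative(list_of_lists):
--     return [
--         [sum(row[: i + 1]) for i in range(len(row) - 1)]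
--         for row in list_of_lists
--     ]
-- ===== Notes on version B (the rewrite author's own statement) =====
-- stated objective: alternative
-- what changed: Replaces the explicit accumulator loops and slicing off the last element with a nested comprehension that recomputes each cumulative value as the sum of a prefix slice, ranging only up to len(signal)-1 so no trailing element is ever produced.
import Mathlib
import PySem

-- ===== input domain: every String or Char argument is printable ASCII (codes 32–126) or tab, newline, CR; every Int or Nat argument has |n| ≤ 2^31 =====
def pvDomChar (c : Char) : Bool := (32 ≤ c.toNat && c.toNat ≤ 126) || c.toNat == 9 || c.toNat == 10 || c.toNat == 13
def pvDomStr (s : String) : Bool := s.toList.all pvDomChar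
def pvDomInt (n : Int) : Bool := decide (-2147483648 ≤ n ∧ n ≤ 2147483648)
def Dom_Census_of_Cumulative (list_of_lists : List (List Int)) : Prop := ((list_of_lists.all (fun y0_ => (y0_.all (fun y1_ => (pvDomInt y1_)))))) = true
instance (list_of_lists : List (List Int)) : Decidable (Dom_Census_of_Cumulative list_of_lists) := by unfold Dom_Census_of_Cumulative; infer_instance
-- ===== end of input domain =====

-- B replaces the running-accumulator pass with a nested comprehension that sums a prefix slice
-- for each output position (an alternative, not faster, decomposition); return values agree.

-- ===== PORT A =====
-- inner loop: carries (aggregation, cumulative_signal); outer loop appends cumulative_signal[:-1]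
def Census_of_Cumulative (list_of_lists : List (List Int)) : List (List Int) :=
  list_of_lists.foldl
    (fun Cumulative_Census signal =>
      let st := signal.foldl
        (fun (p : Int × List Int) value =>
          let aggregation := p.1 + value
          (aggregation, p.2 ++ [aggregation])) (0, [])
      Cumulative_Census ++ [PySem.List.slice st.2 none (some (-1))]) []

-- ===== PORT B =====
-- nested comprehension: for each signal, [sum(signal[:i+1]) for i in range(len(signal)-1)]
def Census_of_Cumulative_alt (list_of_lists : List (List Int)) : List (List Int) :=
  list_of_lists.map (fun signal =>
    (PySem.List.pyRange 0 ((signal.length : Int) - 1) 1).map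
      (fun i => (PySem.List.slice signal none (some (i + 1))).sum))

-- ===== PRECONDITION & SPEC =====
def Spec_Census_of_Cumulative (list_of_lists : List (List Int)) (out : List (List Int)) : Prop := out = Census_of_Cumulative_alt list_of_lists
instance (list_of_lists : List (List Int)) (out : List (List Int)) : Decidable (Spec_Census_of_Cumulative list_of_lists out) := by unfold Spec_Census_of_Cumulative; infer_instance

-- ===== CLAIM (what is proved, stated in full; the proofs are below) =====
def Claim_equal_Census_of_Cumulative : Prop := ∀ (list_of_lists : List (List Int)), Dom_Census_of_Cumulative list_of_lists → Spec_Census_of_Cumulative list_of_lists (Census_of_Cumulative list_of_lists)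

-- ===== LEMMAS AND PROOFS =====

-- A's inner accumulation, characterised: the produced list is the prefix sums offset by the incoming accumulator.
theorem innerA_eq (signal : List Int) : ∀ (a : Int) (cs : List Int),
    (signal.foldl (fun (p : Int × List Int) value =>
        (p.1 + value, p.2 ++ [p.1 + value])) (a, cs)).2
      = cs ++ (List.range signal.length).map (fun k => a + (signal.take (k + 1)).sum) := by
  induction signal with
  | nil => simp
  | cons v t ih =>
    intro a cs
    simp only [List.foldl_cons, List.length_cons, List.range_succ_eq_map]
    rw [ih (a + v) (cs ++ [a + v])]
    simp [List.map_map, Function.comp, add_assoc, List.append_assoc]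

-- B's inner comprehension, simplified to the same prefix-sum form (minus the last entry).
theorem innerB_eq (signal : List Int) :
    (PySem.List.pyRange 0 ((signal.length : Int) - 1) 1).map
      (fun i => (PySem.List.slice signal none (some (i + 1))).sum)
      = (List.range (signal.length - 1)).map (fun k => (signal.take (k + 1)).sum) := by
  rw [PySem.List.pyRange_one]
  have h : ((signal.length : Int) - 1 - 0).toNat = signal.length - 1 := by omega
  rw [h, List.map_map]
  apply List.map_congr_left
  intro k hk
  simp only [Function.comp]
  have hb : (0 : Int) + k + 1 = ((k + 1 : Nat) : Int) := by push_cast; ring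
  rw [hb, PySem.List.slice_to_natCast]

-- dropping the last element of the full prefix-sum table is the table over range (n-1)
theorem dropLast_table (signal : List Int) :
    ((List.range signal.length).map (fun k => (signal.take (k + 1)).sum)).dropLast
      = (List.range (signal.length - 1)).map (fun k => (signal.take (k + 1)).sum) := by
  cases hn : signal.length with
  | zero => simp
  | succ n => rw [List.range_succ, List.map_append]; simp

-- ===== VERDICT (by name: the statement is the Claim_ definition above) =====
theorem Census_of_Cumulative_spec : Claim_equal_Census_of_Cumulative := by
  intro xs _
  unfold Spec_Census_of_Cumulative Census_of_Cumulative Census_of_Cumulative_alt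
  rw [PySem.List.foldl_append_singleton_eq_map]
  apply List.map_congr_left
  intro signal _
  rw [innerA_eq signal 0 [], innerB_eq, PySem.List.slice_to_neg_one]
  simp [dropLast_table]
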